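-- pv_equiv track=rewrite | github.com/SalimMersally/COE543-Project-II | indexing.py | getIndexingTable
-- ===== SOURCE A (Python) =====
-- def getIndexingTable(list,XMLpaths):
--     dic={"":()}
--     i =0
--     for arr in list:
--         for tuple in arr:
--             term = tuple[0]
--             if term in dic:
--                 if XMLpaths[i] not in dic[term] :
--                     dic[term]=dic[term]+ (XMLpaths[i],)
--             else:
--                 dic[term] = (XMLpaths[i],)
--         i +=1;
--
--     return dic
-- ===== SOURCE B (Python) =====
-- def getIndexingTable(list, XMLpaths):
--     # group-by-term: flatten to (term, path) pairs, then one scan per distinct term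
--     pairs = [(term, path) for arr, path in zip(list, XMLpaths) for term, _ in arr]
--     terms = dict.fromkeys([""] + [term for term, _ in pairs])
--     return {t: tuple(dict.fromkeys(path for term, path in pairs if term == t)) for t in terms}
-- ===== Notes on version B (the rewrite author's own statement) =====
-- stated objective: alternative
-- what changed: A makes a single indexed nested pass building a dict with an in-loop membership test on the growing tuple; B first flattens zip(list, XMLpaths) into a flat (term, path) pair list and then group-bys: for each distinct term (first-occurrence order, '' seeded first) it rescans the pair list and dedups the matching paths with dict.fromkeys.
import Mathlib
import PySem

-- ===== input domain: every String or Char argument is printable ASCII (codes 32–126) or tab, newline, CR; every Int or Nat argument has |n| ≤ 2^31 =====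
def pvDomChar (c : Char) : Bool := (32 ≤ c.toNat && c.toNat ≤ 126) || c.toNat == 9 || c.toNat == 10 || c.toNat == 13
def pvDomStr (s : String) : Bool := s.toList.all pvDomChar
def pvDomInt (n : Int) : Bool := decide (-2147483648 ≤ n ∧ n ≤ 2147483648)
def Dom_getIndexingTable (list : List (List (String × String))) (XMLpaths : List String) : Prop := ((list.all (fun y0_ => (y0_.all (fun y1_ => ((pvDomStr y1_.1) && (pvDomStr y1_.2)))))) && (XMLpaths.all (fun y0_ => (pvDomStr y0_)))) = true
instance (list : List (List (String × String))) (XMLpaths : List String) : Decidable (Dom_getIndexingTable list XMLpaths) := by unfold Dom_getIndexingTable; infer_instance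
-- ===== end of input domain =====

-- B flattens zip(list, XMLpaths) into a flat (term, path) pair list and groups by
-- distinct term (first-occurrence order, "" seeded first), deduping each group once,
-- instead of A's indexed nested pass with an in-loop membership test.

-- ===== PORT A =====
-- inner-loop body: term = tuple[0]; membership-checked append of XMLpaths[i]
def pvAInner (XMLpaths : List String) (i : Int) (dic : PySem.Dict String (List String)) (tup : String × String) : PySem.Dict String (List String) :=
  let term := tup.1
  if dic.contains term then
    if PySem.List.pyGetD XMLpaths i "" ∈ dic.getD term [] then dic
    else dic.insert term (dic.getD term [] ++ [PySem.List.pyGetD XMLpaths i ""])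
  else dic.insert term [PySem.List.pyGetD XMLpaths i ""]

-- outer-loop body: fold the inner loop over arr, then i += 1
def pvAOuter (XMLpaths : List String) (st : PySem.Dict String (List String) × Int) (arr : List (String × String)) : PySem.Dict String (List String) × Int :=
  (arr.foldl (pvAInner XMLpaths st.2) st.1, st.2 + 1)

def getIndexingTable (list : List (List (String × String))) (XMLpaths : List String) : List (String × List String) :=
  ((list.foldl (pvAOuter XMLpaths) ((PySem.Dict.empty).insert "" [], 0)).1).items

-- ===== PORT B =====
-- pairs = [(term, path) for arr, path in zip(list, XMLpaths) for term, _ in arr]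
def pvPairs (list : List (List (String × String))) (XMLpaths : List String) : List (String × String) :=
  (list.zip XMLpaths).flatMap (fun ap => ap.1.map (fun t => (t.1, ap.2)))

def getIndexingTable_alt (list : List (List (String × String))) (XMLpaths : List String) : List (String × List String) :=
  let pairs := pvPairs list XMLpaths
  -- terms = dict.fromkeys([""] + [term for term, _ in pairs])
  let terms := PySem.List.dedup ("" :: pairs.map Prod.fst)
  -- {t: tuple(dict.fromkeys(path for term, path in pairs if term == t)) for t in terms}
  (terms.foldl (fun d t => d.insert t (PySem.List.dedup ((pairs.filter (fun q => q.1 == t)).map Prod.snd))) PySem.Dict.empty).items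

-- ===== PRECONDITION & SPEC =====
-- Pre_ excludes exactly the inputs where A raises IndexError: a non-empty inner list
-- at position i with i out of range of XMLpaths.
def Pre_getIndexingTable (list : List (List (String × String))) (XMLpaths : List String) : Prop :=
  ∀ p ∈ list.zipIdx, p.1 ≠ [] → p.2 < XMLpaths.length
instance (list : List (List (String × String))) (XMLpaths : List String) : Decidable (Pre_getIndexingTable list XMLpaths) := by unfold Pre_getIndexingTable; infer_instance
def pvWitness_getIndexingTable : (List (List (String × String))) × List String :=
  ([[("a", "x")], [], [("b", "y"), ("a", "z")]], ["p1", "p2", "p3"])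

def Spec_getIndexingTable (list : List (List (String × String))) (XMLpaths : List String) (out : List (String × List String)) : Prop := out = getIndexingTable_alt list XMLpaths
instance (list : List (List (String × String))) (XMLpaths : List String) (out : List (String × List String)) : Decidable (Spec_getIndexingTable list XMLpaths out) := by unfold Spec_getIndexingTable; infer_instance

-- ===== CLAIM (what is proved, stated in full; the proofs are below) =====
def Claim_equal_getIndexingTable : Prop := ∀ (list : List (List (String × String))) (XMLpaths : List String), Dom_getIndexingTable list XMLpaths → Pre_getIndexingTable list XMLpaths → Spec_getIndexingTable list XMLpaths (getIndexingTable list XMLpaths)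

-- ===== LEMMAS AND PROOFS =====

-- A's inner step, on a flat (term, path) pair
def pvAStep (d : PySem.Dict String (List String)) (q : String × String) : PySem.Dict String (List String) :=
  if d.contains q.1 then
    if q.2 ∈ d.getD q.1 [] then d
    else d.insert q.1 (d.getD q.1 [] ++ [q.2])
  else d.insert q.1 [q.2]

-- collect step (proof device): append q.2 to the group of q.1 unconditionally
def pvCStep (d : PySem.Dict String (List String)) (q : String × String) : PySem.Dict String (List String) :=
  d.modify q.1 [] (· ++ [q.2])

-- dedup every value of a dict (proof device)
def pvMapDedup (c : PySem.Dict String (List String)) : PySem.Dict String (List String) :=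
  PySem.Dict.mk (c.items.map (fun p => (p.1, PySem.List.dedup p.2)))

theorem pvMapDedup_contains (c : PySem.Dict String (List String)) (k : String) :
    (pvMapDedup c).contains k = c.contains k := by
  obtain ⟨l⟩ := c
  simp only [pvMapDedup, PySem.Dict.contains_mk, List.any_map]
  rfl

theorem pvMapDedup_keys (c : PySem.Dict String (List String)) :
    (pvMapDedup c).keys = c.keys := by
  obtain ⟨l⟩ := c
  simp only [pvMapDedup, PySem.Dict.keys, List.map_map]
  rfl

theorem pvMapDedup_get? (c : PySem.Dict String (List String)) (k : String) :
    (pvMapDedup c).get? k = (c.get? k).map PySem.List.dedup := by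
  obtain ⟨l⟩ := c
  induction l with
  | nil => rfl
  | cons a rest ih =>
    rw [show pvMapDedup ⟨a :: rest⟩ = ⟨(a.1, PySem.List.dedup a.2) :: (pvMapDedup ⟨rest⟩).items⟩ from rfl]
    rw [PySem.Dict.get?_mk_cons, PySem.Dict.get?_mk_cons]
    by_cases h : a.1 == k
    · simp [h]
    · simp only [h, Bool.false_eq_true, ite_false]
      exact ih

theorem pvMapDedup_getD (c : PySem.Dict String (List String)) (k : String) :
    (pvMapDedup c).getD k [] = PySem.List.dedup (c.getD k []) := by
  rw [PySem.Dict.getD_eq_get?_getD, PySem.Dict.getD_eq_get?_getD, pvMapDedup_get?]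
  cases c.get? k <;> rfl

theorem pvMapDedup_insert (c : PySem.Dict String (List String)) (k : String) (v : List String) :
    pvMapDedup (c.insert k v) = (pvMapDedup c).insert k (PySem.List.dedup v) := by
  apply PySem.Dict.ext
  cases h : c.contains k with
  | true =>
    have h' : (pvMapDedup c).contains k = true := by rw [pvMapDedup_contains]; exact h
    rw [show (pvMapDedup (c.insert k v)).items = (c.insert k v).items.map (fun p => (p.1, PySem.List.dedup p.2)) from rfl,
        PySem.Dict.items_insert_of_contains c v h,
        PySem.Dict.items_insert_of_contains (pvMapDedup c) (PySem.List.dedup v) h',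
        show (pvMapDedup c).items = c.items.map (fun p => (p.1, PySem.List.dedup p.2)) from rfl,
        List.map_map, List.map_map]
    apply List.map_congr_left
    intro p _
    by_cases hp : p.1 == k <;> simp [Function.comp, hp]
  | false =>
    have h' : (pvMapDedup c).contains k = false := by rw [pvMapDedup_contains]; exact h
    rw [show (pvMapDedup (c.insert k v)).items = (c.insert k v).items.map (fun p => (p.1, PySem.List.dedup p.2)) from rfl,
        PySem.Dict.items_insert_of_not_contains c v h,
        PySem.Dict.items_insert_of_not_contains (pvMapDedup c) (PySem.List.dedup v) h',
        show (pvMapDedup c).items = c.items.map (fun p => (p.1, PySem.List.dedup p.2)) from rfl,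
        List.map_append]
    simp

theorem pvDedup_append_singleton (ps : List String) (p : String) :
    PySem.List.dedup (ps ++ [p]) =
      if p ∈ ps then PySem.List.dedup ps else PySem.List.dedup ps ++ [p] := by
  rw [PySem.List.dedup_eq_ofList, PySem.List.dedup_eq_ofList, PySem.Set.ofList_append_singleton]
  by_cases hp : p ∈ ps
  · rw [if_pos hp]
    exact PySem.Set.add_of_mem ((PySem.Set.mem_ofList ps p).mpr hp)
  · rw [if_neg hp]
    exact PySem.Set.add_of_not_mem (fun hm => hp ((PySem.Set.mem_ofList ps p).mp hm))

theorem pvGet?_of_contains (c : PySem.Dict String (List String)) (k : String)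
    (h : c.contains k = true) : c.get? k = some (c.getD k []) := by
  rw [PySem.Dict.contains_eq_isSome_get?] at h
  rw [PySem.Dict.getD_eq_get?_getD]
  cases hg : c.get? k with
  | none => rw [hg] at h; simp at h
  | some v => rfl

theorem pvInsert_noop (c : PySem.Dict String (List String)) (k : String) (v : List String)
    (hnd : c.keys.Nodup) (hg : c.get? k = some v) : c.insert k v = c := by
  have hc : c.contains k = true := by
    rw [PySem.Dict.contains_eq_isSome_get?, hg]; rfl
  apply PySem.Dict.ext
  rw [PySem.Dict.items_insert_of_contains c v hc]
  have hcong : ∀ p ∈ c.items, (if p.1 == k then (k, v) else p) = p := by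
    intro p hp
    obtain ⟨p1, p2⟩ := p
    by_cases hpk : p1 == k
    · have hk : p1 = k := by simpa using hpk
      have hsome : c.get? p1 = some p2 := PySem.Dict.get?_of_mem_items c hp hnd
      rw [hk, hg] at hsome
      have hv : v = p2 := Option.some.inj hsome
      simp only [hpk, if_pos]
      rw [← hk, hv]
    · simp [hpk]
  calc (c.items.map fun p => if p.1 == k then (k, v) else p) = c.items.map id := List.map_congr_left (by simpa using hcong)
    _ = c.items := List.map_id c.items

-- one step: A's step on the deduped dict = dedup of the collect step
theorem pvStep (c : PySem.Dict String (List String)) (q : String × String) (hnd : c.keys.Nodup) :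
    pvAStep (pvMapDedup c) q = pvMapDedup (pvCStep c q) := by
  have hC : pvCStep c q = c.insert q.1 (c.getD q.1 [] ++ [q.2]) := rfl
  have hA : pvAStep (pvMapDedup c) q =
      (if (pvMapDedup c).contains q.1 then
        (if q.2 ∈ (pvMapDedup c).getD q.1 [] then pvMapDedup c
         else (pvMapDedup c).insert q.1 ((pvMapDedup c).getD q.1 [] ++ [q.2]))
       else (pvMapDedup c).insert q.1 [q.2]) := rfl
  rw [hA, hC, pvMapDedup_insert, pvMapDedup_contains, pvMapDedup_getD, pvDedup_append_singleton]
  cases hc : c.contains q.1 with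
  | true =>
    rw [if_pos rfl]
    simp only [PySem.List.mem_dedup]
    by_cases hp : q.2 ∈ c.getD q.1 []
    · rw [if_pos hp, if_pos hp]
      have hnd' : (pvMapDedup c).keys.Nodup := by rw [pvMapDedup_keys]; exact hnd
      have hg : (pvMapDedup c).get? q.1 = some (PySem.List.dedup (c.getD q.1 [])) := by
        rw [pvMapDedup_get?, pvGet?_of_contains c q.1 hc]; rfl
      exact (pvInsert_noop (pvMapDedup c) q.1 _ hnd' hg).symm
    · rw [if_neg hp, if_neg hp]
  | false =>
    rw [if_neg (by simp)]
    rw [PySem.Dict.getD_of_not_contains c [] hc]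
    simp [PySem.List.dedup_eq_ofList, PySem.Set.ofList_nil]

theorem pvCStep_nodup (c : PySem.Dict String (List String)) (q : String × String)
    (hnd : c.keys.Nodup) : (pvCStep c q).keys.Nodup :=
  PySem.Dict.nodup_keys_insert _ _ _ hnd

theorem pvCFold_nodup (qs : List (String × String)) (c : PySem.Dict String (List String))
    (hnd : c.keys.Nodup) : (qs.foldl pvCStep c).keys.Nodup := by
  induction qs generalizing c with
  | nil => exact hnd
  | cons q rest ih => exact ih _ (pvCStep_nodup c q hnd)

-- the whole A-step fold commutes with dedup-of-values over the collect fold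
theorem pvFoldStep (qs : List (String × String)) (c : PySem.Dict String (List String))
    (hnd : c.keys.Nodup) :
    qs.foldl pvAStep (pvMapDedup c) = pvMapDedup (qs.foldl pvCStep c) := by
  induction qs generalizing c with
  | nil => rfl
  | cons q rest ih =>
    simp only [List.foldl_cons]
    rw [pvStep c q hnd]
    exact ih _ (pvCStep_nodup c q hnd)

-- A's indexed nested fold = the flat pvAStep fold over the zipped pairs
theorem pvFlatten (l : List (List (String × String))) (xs : List String) (i : Nat)
    (d : PySem.Dict String (List String))
    (H : ∀ p ∈ l.zipIdx i, p.1 ≠ [] → p.2 < xs.length) :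
    (l.foldl (pvAOuter xs) (d, (i : Int))).1 = (pvPairs l (xs.drop i)).foldl pvAStep d := by
  induction l generalizing d i with
  | nil => rfl
  | cons arr rest ih =>
    have Hrest : ∀ p ∈ rest.zipIdx (i + 1), p.1 ≠ [] → p.2 < xs.length := by
      intro p hp
      exact H p (by rw [List.zipIdx_cons]; exact List.mem_cons_of_mem _ hp)
    by_cases hlen : i < xs.length
    · have hdrop : xs.drop i = xs[i] :: xs.drop (i + 1) := (List.getElem_cons_drop hlen).symm
      have hinner : arr.foldl (pvAInner xs (i : Int)) d
          = (arr.map (fun t => (t.1, xs[i]))).foldl pvAStep d := by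
        have hget : PySem.List.pyGetD xs (i : Int) "" = xs[i] := by
          rw [PySem.List.pyGetD_natCast]
          exact List.getD_eq_getElem xs "" hlen
        rw [List.foldl_map]
        apply PySem.List.foldl_congr_mem
        intro acc t _
        simp only [pvAInner, pvAStep, hget]
      have : (rest.foldl (pvAOuter xs) ((arr.map (fun t => (t.1, xs[i]))).foldl pvAStep d, ((i : Int) + 1))).1
          = (pvPairs rest (xs.drop (i + 1))).foldl pvAStep ((arr.map (fun t => (t.1, xs[i]))).foldl pvAStep d) := by
        have := ih (i + 1) ((arr.map (fun t => (t.1, xs[i]))).foldl pvAStep d) Hrest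
        simpa using this
      calc ((arr :: rest).foldl (pvAOuter xs) (d, (i : Int))).1
          = (rest.foldl (pvAOuter xs) (arr.foldl (pvAInner xs (i : Int)) d, ((i : Int) + 1))).1 := rfl
        _ = (pvPairs rest (xs.drop (i + 1))).foldl pvAStep ((arr.map (fun t => (t.1, xs[i]))).foldl pvAStep d) := by
            rw [hinner]; exact this
        _ = (pvPairs (arr :: rest) (xs.drop i)).foldl pvAStep d := by
            rw [hdrop]
            simp only [pvPairs, List.zip_cons_cons, List.flatMap_cons, List.foldl_append]
    · have harr : arr = [] := by
        by_contra hne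
        exact hlen (H (arr, i) (by rw [List.zipIdx_cons]; exact List.mem_cons_self) hne)
      have hdrop : xs.drop i = [] := List.drop_eq_nil_of_le (by omega)
      have hdrop' : xs.drop (i + 1) = [] := List.drop_eq_nil_of_le (by omega)
      have : (rest.foldl (pvAOuter xs) (d, ((i : Int) + 1))).1
          = (pvPairs rest (xs.drop (i + 1))).foldl pvAStep d := by
        have := ih (i + 1) d Hrest
        simpa using this
      calc ((arr :: rest).foldl (pvAOuter xs) (d, (i : Int))).1
          = (rest.foldl (pvAOuter xs) (arr.foldl (pvAInner xs (i : Int)) d, ((i : Int) + 1))).1 := rfl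
        _ = (pvPairs rest (xs.drop (i + 1))).foldl pvAStep d := by rw [harr]; exact this
        _ = (pvPairs (arr :: rest) (xs.drop i)).foldl pvAStep d := by
            rw [hdrop, hdrop']
            simp [pvPairs]

-- ===== VERDICT (by name: the statement is the Claim_ definition above) =====
theorem getIndexingTable_spec : Claim_equal_getIndexingTable := by
  intro list XMLpaths _ hpre
  unfold Spec_getIndexingTable getIndexingTable getIndexingTable_alt
  -- A's nested indexed fold equals the flat pvAStep fold over the pairs
  have hflat := pvFlatten list XMLpaths 0 ((PySem.Dict.empty).insert "" []) hpre
  rw [List.drop_zero] at hflat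
  rw [show ((0 : Int)) = ((0 : Nat) : Int) from rfl, hflat]
  -- commute dedup through the collect fold
  have hnd0 : ((PySem.Dict.empty : PySem.Dict String (List String)).insert "" []).keys.Nodup := by decide
  have hinit : ((PySem.Dict.empty : PySem.Dict String (List String)).insert "" [])
      = pvMapDedup ((PySem.Dict.empty).insert "" []) := rfl
  rw [hinit, pvFoldStep _ _ hnd0]
  -- characterize the collect fold: keys and per-key groups
  set pairs := pvPairs list XMLpaths with hpairs
  set C := pairs.foldl pvCStep ((PySem.Dict.empty).insert "" []) with hC
  have hndC : C.keys.Nodup := pvCFold_nodup _ _ hnd0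
  have hkeys : C.keys = PySem.List.dedup ("" :: pairs.map Prod.fst) := by
    rw [hC]
    have : pairs.foldl pvCStep ((PySem.Dict.empty).insert "" [])
        = pairs.foldl (fun d x => d.modify (Prod.fst x) ((fun _ => ([] : List String)) x) ((fun x => (· ++ [x.2])) x)) ((PySem.Dict.empty).insert "" []) := rfl
    rw [this, PySem.Dict.keys_foldl_modify_key]
    rw [PySem.List.dedup_eq_ofList, PySem.Set.ofList]
    rfl
  have hgetD : ∀ t : String, C.getD t [] = (pairs.filter (fun q => q.1 == t)).map Prod.snd := by
    intro t
    rw [hC]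
    have : pairs.foldl pvCStep ((PySem.Dict.empty).insert "" [])
        = pairs.foldl (fun d p => d.modify p.1 [] (· ++ [p.2])) ((PySem.Dict.empty).insert "" []) := rfl
    rw [this, PySem.Dict.getD_foldl_modify_append]
    by_cases ht : t = ""
    · subst ht
      rw [PySem.Dict.getD_insert_self]
      rfl
    · rw [PySem.Dict.getD_insert_of_ne _ _ _ ht, PySem.Dict.getD_empty]
      rfl
  -- items of the deduped collect dict
  have hitemsC : C.items = C.keys.map (fun k => (k, C.getD k [])) :=
    PySem.Dict.items_eq_map_keys C hndC []
  have hitemsD : (pvMapDedup C).items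
      = (PySem.List.dedup ("" :: pairs.map Prod.fst)).map
          (fun t => (t, PySem.List.dedup ((pairs.filter (fun q => q.1 == t)).map Prod.snd))) := by
    rw [show (pvMapDedup C).items = C.items.map (fun p => (p.1, PySem.List.dedup p.2)) from rfl,
        hitemsC, hkeys, List.map_map]
    apply List.map_congr_left
    intro t _
    simp only [Function.comp]
    rw [hgetD t]
  -- B's fresh-key insert fold appends exactly these items
  have hB : ((PySem.List.dedup ("" :: pairs.map Prod.fst)).foldl
        (fun d t => d.insert t (PySem.List.dedup ((pairs.filter (fun q => q.1 == t)).map Prod.snd)))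
        PySem.Dict.empty).items
      = (PySem.List.dedup ("" :: pairs.map Prod.fst)).map
          (fun t => (t, PySem.List.dedup ((pairs.filter (fun q => q.1 == t)).map Prod.snd))) := by
    have h1 : ∀ a ∈ PySem.List.dedup ("" :: pairs.map Prod.fst),
        (PySem.Dict.empty : PySem.Dict String (List String)).contains a = false :=
      fun a _ => PySem.Dict.contains_empty a
    have h2 : ((PySem.List.dedup ("" :: pairs.map Prod.fst)).map (fun t => t)).Nodup := by
      rw [List.map_id']
      exact PySem.List.nodup_dedup ("" :: pairs.map Prod.fst)
    have := PySem.Dict.items_foldl_insert_fresh (PySem.List.dedup ("" :: pairs.map Prod.fst))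
        (fun t => t)
        (fun t => PySem.List.dedup ((pairs.filter (fun q => q.1 == t)).map Prod.snd))
        PySem.Dict.empty h1 h2
    simpa using this
  rw [hitemsD, hB]
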